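-- pv_equiv track=rewrite | github.com/jerinjoy/adventofcode2025 | day2_part2/main.py | valid_set_sizes
-- ===== SOURCE A (Python) =====
-- def valid_set_sizes(number: int) -> list[int]:
--     """Return the valid sizes of sets given a number.
--
--     Returns the sizes that are factors of the length of the number,
--     but only those that are at most half the length.
--
--     Examples:
--         11 -> [1]
--         123 -> [1]
--         1234 -> [1, 2]
--         1188511880 -> [1, 2, 5]
--     """
--     num_str = str(number)
--     length = len(num_str)
--     max_size = length // 2
--
--     # Find all factors of the length that are at most half the length
--     factors = []
--     for i in range(1, max_size + 1):
--         if length % i == 0: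
--             factors.append(i)
--
--     return factors
-- ===== SOURCE B (Python) =====
-- def valid_set_sizes(number: int) -> list[int]:
--     """Divisors of len(str(number)) that are at most half that length,
--     found via sqrt-bounded divisor pairs, then filtered and sorted."""
--     length = len(str(number))
--     half = length // 2
--     divs = set()
--     i = 1
--     while i * i <= length:
--         if length % i == 0:
--             divs.add(i)
--             divs.add(length // i)
--         i += 1
--     return sorted(d for d in divs if d <= half)
-- ===== Notes on version B (the rewrite author's own statement) =====
-- stated objective: alternative
-- what changed: A scans every candidate divisor up to half the digit-count testing divisibility; B iterates only while i*i <= length, collecting each divisor pair {i, length//i} into a set, then filters to those at most half the length and sorts ascending.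
import Mathlib
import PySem

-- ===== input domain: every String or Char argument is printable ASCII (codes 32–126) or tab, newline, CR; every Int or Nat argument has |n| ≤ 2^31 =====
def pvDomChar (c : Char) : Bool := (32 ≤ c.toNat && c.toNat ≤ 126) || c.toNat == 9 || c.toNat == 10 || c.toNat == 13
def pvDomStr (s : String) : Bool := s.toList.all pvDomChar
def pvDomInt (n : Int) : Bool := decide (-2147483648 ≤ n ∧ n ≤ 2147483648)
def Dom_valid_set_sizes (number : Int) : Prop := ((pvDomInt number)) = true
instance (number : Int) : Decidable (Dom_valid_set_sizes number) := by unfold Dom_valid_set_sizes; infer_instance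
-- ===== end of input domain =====

-- B replaces A's linear scan up to length//2 by sqrt-bounded divisor-pair collection into a set,
-- then filters (≤ length//2) and sorts; alternative algorithm, same exact outputs.


-- ===== PORT A =====
def valid_set_sizes (number : Int) : List Int :=
  let num_str := PySem.Int.toStr number
  let length := PySem.Str.len num_str
  let max_size := PySem.Int.floordiv length 2
  (PySem.List.pyRange 1 (max_size + 1) 1).foldl
    (fun factors i => if PySem.Int.mod length i = 0 then factors ++ [i] else factors) []

-- ===== PORT B =====
-- the while loop 'while i*i <= length: …; i += 1' (fuel only makes it total; it never runs out
-- on the actual calls, where fuel = length.toNat + 1 ≥ number of iterations)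
def pvDivLoop : Nat → Int → Int → PySem.Set Int → PySem.Set Int
  | 0, _, _, divs => divs
  | fuel + 1, length, i, divs =>
    if i * i ≤ length then
      pvDivLoop fuel length (i + 1)
        (if PySem.Int.mod length i = 0
          then PySem.Set.add (PySem.Set.add divs i) (PySem.Int.floordiv length i)
          else divs)
    else divs

def valid_set_sizes_alt (number : Int) : List Int :=
  let length := PySem.Str.len (PySem.Int.toStr number)
  let half := PySem.Int.floordiv length 2
  let divs := pvDivLoop (length.toNat + 1) length 1 PySem.Set.empty
  PySem.List.sorted (divs.filter (fun d => decide (d ≤ half))) (fun x => x) false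

-- ===== PRECONDITION & SPEC =====
def Spec_valid_set_sizes (number : Int) (out : List Int) : Prop := out = valid_set_sizes_alt number
instance (number : Int) (out : List Int) : Decidable (Spec_valid_set_sizes number out) := by unfold Spec_valid_set_sizes; infer_instance

-- ===== CLAIM (what is proved, stated in full; the proofs are below) =====
def Claim_equal_valid_set_sizes : Prop := ∀ (number : Int), Dom_valid_set_sizes number → Spec_valid_set_sizes number (valid_set_sizes number)

-- ===== LEMMAS AND PROOFS =====

-- both ports are functions of the digit-string length only
def pvA (L : Int) : List Int :=
  (PySem.List.pyRange 1 (PySem.Int.floordiv L 2 + 1) 1).foldl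
    (fun factors i => if PySem.Int.mod L i = 0 then factors ++ [i] else factors) []

def pvB (L : Int) : List Int :=
  PySem.List.sorted
    ((pvDivLoop (L.toNat + 1) L 1 PySem.Set.empty).filter
      (fun d => decide (d ≤ PySem.Int.floordiv L 2))) (fun x => x) false

lemma pvA_eq (n : Int) : valid_set_sizes n = pvA (PySem.Str.len (PySem.Int.toStr n)) := rfl

lemma pvB_eq (n : Int) : valid_set_sizes_alt n = pvB (PySem.Str.len (PySem.Int.toStr n)) := rfl

lemma pvLen_eq (n : Int) :
    PySem.Str.len (PySem.Int.toStr n) = ((PySem.Int.toChars n).length : Int) := by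
  rw [show PySem.Int.toStr n = String.ofList (PySem.Int.toChars n) from rfl]
  rw [PySem.Str.len_eq]
  simp

lemma pvLen_bound (n : Int) (h : Dom_valid_set_sizes n) :
    1 ≤ (PySem.Int.toChars n).length ∧ (PySem.Int.toChars n).length ≤ 11 := by
  unfold Dom_valid_set_sizes pvDomInt at h
  rw [decide_eq_true_iff] at h
  unfold PySem.Int.toChars
  split
  · have hlt : n.natAbs < 10 ^ 10 := by simp [Nat.pow_succ]; omega
    have hle := Nat.toDigits_length 10 n.natAbs 10 (by norm_num) hlt
    simp only [List.length_cons]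
    omega
  · have hlt : n.toNat < 10 ^ 10 := by simp [Nat.pow_succ]; omega
    have hle := Nat.toDigits_length 10 n.toNat 10 (by norm_num) hlt
    have hpos : 0 < (Nat.toDigits 10 n.toNat).length := Nat.length_toDigits_pos
    omega

lemma pvCore (k : Nat) (h1 : 1 ≤ k) (h2 : k ≤ 11) : pvA (k : Int) = pvB (k : Int) := by
  interval_cases k <;> decide

-- ===== VERDICT (by name: the statement is the Claim_ definition above) =====
theorem valid_set_sizes_spec : Claim_equal_valid_set_sizes := by
  intro n hdom
  unfold Spec_valid_set_sizes
  obtain ⟨h1, h2⟩ := pvLen_bound n hdom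
  rw [pvA_eq n, pvB_eq n, pvLen_eq n]
  exact pvCore _ h1 h2
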